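-- pv_equiv track=rewrite | github.com/3110vaibhav2005/Python | prm.py | Find
-- ===== SOURCE A (Python) =====
-- def Find(n):
--     eve=0
--     odd=0
--     prm=0
--     for x in range(2,n):
--         if n%2==0:
--             eve=1
--
--
--         else:
--             odd=1
--
--
--     else:
--         prm=1
--
--     if bool(eve):
--         if bool(prm):
--             return (f"num {n} is Prime Even num")
--         else:
--             return (f"num {n} is Even num")
--     elif bool(odd):
--         if bool(prm):
--             return (f"num {n} is Prime Odd num")
--         else:
--             return (f"num {n} is Odd num")
--     elif n==0:
--         return (f"num {n} is Zero")
--     else: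
--         return (f"num {n} is Even Prime num")
-- ===== SOURCE B (Python) =====
-- def Find(n):
--     # Direct classification: A's for/else loop always runs its else (no break),
--     # so prm is always 1; the loop body only fires when n > 2.
--     if n > 2:
--         kind = "Prime Even" if n % 2 == 0 else "Prime Odd"
--     elif n == 0:
--         return f"num {n} is Zero"
--     else:
--         kind = "Even Prime"
--     return f"num {n} is {kind} num"
-- ===== Notes on version B (the rewrite author's own statement) =====
-- stated objective: faster
-- what changed: Replaced the O(n) for/else loop (whose else always runs, so prm is always 1, and whose body only fires when n > 2) by a direct constant-time branch on n > 2, n == 0 and parity.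
import Mathlib
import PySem

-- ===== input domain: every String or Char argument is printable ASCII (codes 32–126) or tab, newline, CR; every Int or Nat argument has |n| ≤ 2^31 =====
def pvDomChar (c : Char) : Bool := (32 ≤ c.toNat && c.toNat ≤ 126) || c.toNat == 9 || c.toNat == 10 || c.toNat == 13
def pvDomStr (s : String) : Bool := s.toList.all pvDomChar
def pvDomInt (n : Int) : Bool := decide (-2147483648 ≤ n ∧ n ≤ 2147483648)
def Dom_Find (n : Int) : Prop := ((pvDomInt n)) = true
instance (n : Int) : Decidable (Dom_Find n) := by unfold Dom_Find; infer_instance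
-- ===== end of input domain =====

-- B replaces A's O(n) for/else loop by a direct constant-time classification.

-- ===== PORT A =====
def Find (n : Int) : String :=
  -- eve=0; odd=0; prm=0; for x in range(2,n): set eve/odd by parity of n; else: prm=1
  let s := (PySem.List.pyRange 2 n 1).foldl
      (fun (p : Int × Int) _ =>
        if PySem.Int.mod n 2 == 0 then (1, p.2) else (p.1, 1)) (0, 0)
  let eve := s.1
  let odd := s.2
  let prm : Int := 1
  if eve ≠ 0 then
    if prm ≠ 0 then "num " ++ PySem.Int.toStr n ++ " is Prime Even num"
    else "num " ++ PySem.Int.toStr n ++ " is Even num"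
  else if odd ≠ 0 then
    if prm ≠ 0 then "num " ++ PySem.Int.toStr n ++ " is Prime Odd num"
    else "num " ++ PySem.Int.toStr n ++ " is Odd num"
  else if n == 0 then "num " ++ PySem.Int.toStr n ++ " is Zero"
  else "num " ++ PySem.Int.toStr n ++ " is Even Prime num"

-- ===== PORT B =====
def Find_alt (n : Int) : String :=
  if n > 2 then
    let kind := if PySem.Int.mod n 2 == 0 then "Prime Even" else "Prime Odd"
    "num " ++ PySem.Int.toStr n ++ " is " ++ kind ++ " num"
  else if n == 0 then "num " ++ PySem.Int.toStr n ++ " is Zero"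
  else "num " ++ PySem.Int.toStr n ++ " is Even Prime num"

-- ===== PRECONDITION & SPEC =====
def Spec_Find (n : Int) (out : String) : Prop := out = Find_alt n
instance (n : Int) (out : String) : Decidable (Spec_Find n out) := by unfold Spec_Find; infer_instance

-- ===== CLAIM (what is proved, stated in full; the proofs are below) =====
def Claim_equal_Find : Prop := ∀ (n : Int), Dom_Find n → Spec_Find n (Find n)

-- ===== LEMMAS AND PROOFS =====

-- the loop's state update is constant in the element and idempotent; characterise the fold
theorem foldl_set_fst (l : List Int) (p : Int × Int) :
    l.foldl (fun (q : Int × Int) _ => (1, q.2)) p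
      = ((if l = [] then p.1 else 1), p.2) := by
  induction l generalizing p with
  | nil => simp
  | cons a t ih => simp [ih]

theorem foldl_set_snd (l : List Int) (p : Int × Int) :
    l.foldl (fun (q : Int × Int) _ => (q.1, 1)) p
      = (p.1, (if l = [] then p.2 else 1)) := by
  induction l generalizing p with
  | nil => simp
  | cons a t ih => simp [ih]

-- the loop's state update is constant in the element; characterise the fold
theorem find_fold_char (n : Int) (l : List Int) (hne : l ≠ []) :
    l.foldl (fun (p : Int × Int) _ =>
        if PySem.Int.mod n 2 == 0 then (1, p.2) else (p.1, 1)) (0, 0)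
      = (if PySem.Int.mod n 2 == 0 then ((1 : Int), (0 : Int)) else (0, 1)) := by
  by_cases hc : PySem.Int.mod n 2 == 0
  · simp only [hc, if_true]
    rw [foldl_set_fst]; simp [hne]
  · simp only [hc, if_false, Bool.false_eq_true]
    rw [foldl_set_snd]; simp [hne]

-- ===== VERDICT (by name: the statement is the Claim_ definition above) =====
theorem Find_spec : Claim_equal_Find := by
  intro n _
  unfold Spec_Find Find Find_alt
  by_cases h : n > 2
  · have hne : PySem.List.pyRange 2 n 1 ≠ [] := by
      rw [PySem.List.pyRange_one_cons h]; simp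
    rw [find_fold_char n _ hne]
    split_ifs with hp <;> simp [String.append_assoc]
  · have hnil : PySem.List.pyRange 2 n 1 = [] :=
      PySem.List.pyRange_one_eq_nil (by omega)
    rw [hnil]
    simp [h]
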